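-- pv_equiv track=rewrite | github.com/PNJaenichen/PNJaenichen.github.io | projects/adventOfCode/2021/Day14.py | maxMinChar
-- ===== SOURCE A (Python) =====
-- def maxMinChar(counters):
--   max = counters[0]
--   min = counters[0]
--   for count in counters[1:]:
--     if count[1] > max[1]:
--       max = count
--     elif count[1] < min[1]:
--       min = count
--   return max, min
-- ===== SOURCE B (Python) =====
-- def maxMinChar(counters):
--   key = lambda c: c[1]
--   return max(counters, key=key), min(counters, key=key)
-- ===== Notes on version B (the rewrite author's own statement) =====
-- stated objective: idiomatic
-- what changed: Replaces the fused manual loop carrying a (max, min) pair with two builtin max()/min() calls keyed on the count; both builtins return the first extremal element, matching A's strict-comparison tie-breaking.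
import Mathlib
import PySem

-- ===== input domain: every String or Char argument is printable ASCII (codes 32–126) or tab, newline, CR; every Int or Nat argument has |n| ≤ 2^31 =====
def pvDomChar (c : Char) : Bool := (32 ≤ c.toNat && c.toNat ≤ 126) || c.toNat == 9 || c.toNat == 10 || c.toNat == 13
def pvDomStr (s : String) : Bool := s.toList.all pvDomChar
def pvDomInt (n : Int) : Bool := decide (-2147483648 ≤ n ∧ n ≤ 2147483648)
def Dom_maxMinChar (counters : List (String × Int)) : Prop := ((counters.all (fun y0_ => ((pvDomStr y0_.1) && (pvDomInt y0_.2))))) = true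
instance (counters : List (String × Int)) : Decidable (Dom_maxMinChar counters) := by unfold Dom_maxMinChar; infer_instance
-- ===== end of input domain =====

-- B replaces A's fused manual max/min loop with two builtin max()/min() calls keyed on the
-- count (idiomatic); equivalence is proved for nonempty input (A raises IndexError on []).


-- ===== PORT A =====
-- A: max = min = counters[0]; for count in counters[1:]: if/elif update; return (max, min)
def maxMinChar (counters : List (String × Int)) : (String × Int) × (String × Int) :=
  match counters with
  | [] => (("", 0), ("", 0))   -- counters[0] raises IndexError here; excluded by Pre_
  | c0 :: _ =>
    (PySem.List.slice counters (some 1) none).foldl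
      (fun (st : (String × Int) × (String × Int)) count =>
        if count.2 > st.1.2 then (count, st.2)
        else if count.2 < st.2.2 then (st.1, count)
        else st)
      (c0, c0)

-- ===== PORT B =====
-- B: return max(counters, key), min(counters, key)
def maxMinChar_alt (counters : List (String × Int)) : (String × Int) × (String × Int) :=
  match PySem.List.max? counters (fun c => c.2), PySem.List.min? counters (fun c => c.2) with
  | some mx, some mn => (mx, mn)
  | _, _ => (("", 0), ("", 0))   -- max()/min() raise ValueError on []; excluded by Pre_

-- ===== PRECONDITION & SPEC =====
-- A raises IndexError (and B's max()/min() raise ValueError) on the empty list.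
def Pre_maxMinChar (counters : List (String × Int)) : Prop := counters ≠ []
instance (counters : List (String × Int)) : Decidable (Pre_maxMinChar counters) := by unfold Pre_maxMinChar; infer_instance
def pvWitness_maxMinChar : (List (String × Int)) := [("a", 2), ("b", 1)]
def Spec_maxMinChar (counters : List (String × Int)) (out : (String × Int) × (String × Int)) : Prop := out = maxMinChar_alt counters
instance (counters : List (String × Int)) (out : (String × Int) × (String × Int)) : Decidable (Spec_maxMinChar counters out) := by unfold Spec_maxMinChar; infer_instance

-- ===== CLAIM (what is proved, stated in full; the proofs are below) =====
def Claim_equal_maxMinChar : Prop := ∀ (counters : List (String × Int)), Dom_maxMinChar counters → Pre_maxMinChar counters → Spec_maxMinChar counters (maxMinChar counters)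

-- ===== LEMMAS AND PROOFS =====

theorem max?_cons_eq (c0 : String × Int) (rest : List (String × Int)) :
    PySem.List.max? (c0 :: rest) (fun c => c.2)
    = some (rest.foldl (fun m x => if m.2 < x.2 then x else m) c0) := by
  induction rest generalizing c0 with
  | nil => rfl
  | cons x t ih =>
    simp only [PySem.List.max?, List.foldl_cons] at ih ⊢
    split_ifs <;> exact ih _

theorem min?_cons_eq (c0 : String × Int) (rest : List (String × Int)) :
    PySem.List.min? (c0 :: rest) (fun c => c.2)
    = some (rest.foldl (fun m x => if x.2 < m.2 then x else m) c0) := by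
  induction rest generalizing c0 with
  | nil => rfl
  | cons x t ih =>
    simp only [PySem.List.min?, List.foldl_cons] at ih ⊢
    split_ifs <;> exact ih _

-- A's fused loop equals the pair of independent folds, given the invariant mn.2 ≤ mx.2
theorem fused_eq_pair (rest : List (String × Int)) (mx mn : String × Int)
    (h : mn.2 ≤ mx.2) :
    rest.foldl
      (fun (st : (String × Int) × (String × Int)) count =>
        if count.2 > st.1.2 then (count, st.2)
        else if count.2 < st.2.2 then (st.1, count)
        else st)
      (mx, mn)
    = (rest.foldl (fun m x => if m.2 < x.2 then x else m) mx,
       rest.foldl (fun m x => if x.2 < m.2 then x else m) mn) := by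
  induction rest generalizing mx mn with
  | nil => rfl
  | cons x t ih =>
    simp only [List.foldl_cons]
    by_cases h1 : x.2 > mx.2
    · have hnm : ¬ x.2 < mn.2 := by omega
      rw [if_pos h1, if_pos (show mx.2 < x.2 by omega), if_neg hnm]
      exact ih x mn (by omega)
    · rw [if_neg h1, if_neg (show ¬ mx.2 < x.2 by omega)]
      by_cases h2 : x.2 < mn.2
      · rw [if_pos h2, if_pos h2]
        exact ih mx x (by omega)
      · rw [if_neg h2, if_neg h2]
        exact ih mx mn h

-- ===== VERDICT (by name: the statement is the Claim_ definition above) =====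
theorem maxMinChar_spec : Claim_equal_maxMinChar := by
  intro counters _ hpre
  unfold Spec_maxMinChar
  match counters with
  | [] => exact absurd rfl hpre
  | c0 :: rest =>
    simp only [maxMinChar, maxMinChar_alt, max?_cons_eq, min?_cons_eq,
      PySem.List.slice_from_one, List.tail_cons]
    exact fused_eq_pair rest c0 c0 le_rfl
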